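-- pv_equiv track=rewrite | github.com/carterlain/ENGR-102 | balancing_numbers.py | is_balancing_number
-- ===== SOURCE A (Python) =====
-- def is_balancing_number(n):
--     # Calculate the sum from 1 to (n-1)
--     sum_left = 0
--     for i in range(1, n):
--         sum_left += i
--
--     # Initialize sum for the right side and the value of r
--     r = 1
--     sum_right = 0
--
--     # Calculate the sum from (n+1) to (n+r) iteratively
--     while True:
--         sum_right += (n + r)
--         # Check if sums are equal
--         if sum_right == sum_left:
--             return r
--         # If the sum_right exceeds sum_left, it's not a balancing number
--         if sum_right > sum_left:
--             return None
--         r += 1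
-- ===== SOURCE B (Python) =====
-- def is_balancing_number(n):
--     # r is a balancing offset iff n*r + r*(r+1)/2 equals 1+2+...+(n-1).
--     # Both sides are monotone in r, so binary-search r in [1, n].
--     target = n * (n - 1) // 2
--     lo, hi = 1, n
--     while lo <= hi:
--         mid = (lo + hi) // 2
--         v = mid * n + mid * (mid + 1) // 2
--         if v == target:
--             return mid
--         if v < target:
--             lo = mid + 1
--         else:
--             hi = mid - 1
--     return None
-- ===== Notes on version B (the rewrite author's own statement) =====
-- stated objective: faster
-- what changed: Replaces A's linear accumulation of the right-hand sum by a binary search for r over [1, n] against the closed-form sums; Pre_ excludes negative n, which are outside the natural domain of balancing numbers and where A's returned value -2n-1 is an artefact of its running sum re-crossing the empty left sum 0.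
-- outside the precondition, e.g. on is_balancing_number(-3): A returns 5, B returns None
import Mathlib
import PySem

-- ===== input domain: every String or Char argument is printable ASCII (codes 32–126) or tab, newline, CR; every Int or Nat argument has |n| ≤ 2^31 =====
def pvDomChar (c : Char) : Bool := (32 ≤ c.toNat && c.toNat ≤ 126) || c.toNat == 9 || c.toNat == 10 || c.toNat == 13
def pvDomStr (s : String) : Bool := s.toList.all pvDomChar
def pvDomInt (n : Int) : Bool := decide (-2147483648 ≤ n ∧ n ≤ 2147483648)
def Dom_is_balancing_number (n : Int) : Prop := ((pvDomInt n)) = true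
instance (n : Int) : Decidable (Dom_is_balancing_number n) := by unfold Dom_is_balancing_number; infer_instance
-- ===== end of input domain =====

-- B replaces A's linear scan over r by a binary search on r against the closed-form sums;
-- objective: faster (asymptotic).

-- ===== PORT A =====
-- A's 'while True:' loop, state (r, sum_right); terminates because either n+r > 0 and
-- sum_right climbs toward sum_left, or r climbs toward 1-n (lexicographic measure).
def pvALoop (n sumLeft r sumRight : Int) : Option Int :=
  let s' := sumRight + (n + r)
  if s' = sumLeft then some r
  else if s' > sumLeft then none
  else pvALoop n sumLeft (r + 1) s'
termination_by ((1 - n - r).toNat, (sumLeft - sumRight).toNat)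
decreasing_by
  by_cases hnr : n + r ≤ 0
  · exact Prod.Lex.left _ _ (by omega)
  · have h1 : (1 - n - (r + 1)).toNat = (1 - n - r).toNat := by omega
    rw [h1]; exact Prod.Lex.right _ (by omega)

def is_balancing_number (n : Int) : Option Int :=
  let sum_left := (PySem.List.pyRange 1 n 1).foldl (fun acc i => acc + i) 0
  pvALoop n sum_left 1 0

-- ===== PORT B =====
def pvBLoop (n target lo hi : Int) : Option Int :=
  if lo ≤ hi then
    let mid := PySem.Int.floordiv (lo + hi) 2
    let v := mid * n + PySem.Int.floordiv (mid * (mid + 1)) 2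
    if v = target then some mid
    else if v < target then pvBLoop n target (mid + 1) hi
    else pvBLoop n target lo (mid - 1)
  else none
termination_by (hi - lo + 1).toNat
decreasing_by
  · have := PySem.Int.floordiv_two_mid_bounds (by assumption : lo ≤ hi); omega
  · have := PySem.Int.floordiv_two_mid_bounds (by assumption : lo ≤ hi); omega

def is_balancing_number_alt (n : Int) : Option Int :=
  let target := PySem.Int.floordiv (n * (n - 1)) 2
  pvBLoop n target 1 n

-- ===== PRECONDITION & SPEC =====
-- Pre_ excludes negative n, which are outside the natural domain of balancing numbers and
-- where A's returned value -2n-1 is an artefact of its running right-hand sum re-crossing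
-- the empty left sum 0.
def Pre_is_balancing_number (n : Int) : Prop := 0 ≤ n
instance (n : Int) : Decidable (Pre_is_balancing_number n) := by unfold Pre_is_balancing_number; infer_instance
def pvWitness_is_balancing_number : Int := 6

def Spec_is_balancing_number (n : Int) (out : Option Int) : Prop := out = is_balancing_number_alt n
instance (n : Int) (out : Option Int) : Decidable (Spec_is_balancing_number n out) := by unfold Spec_is_balancing_number; infer_instance

-- ===== CLAIM (what is proved, stated in full; the proofs are below) =====
def Claim_equal_is_balancing_number : Prop := ∀ (n : Int), Dom_is_balancing_number n → Pre_is_balancing_number n → Spec_is_balancing_number n (is_balancing_number n)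

-- ===== LEMMAS AND PROOFS =====

-- A's first loop: twice the sum of range(1, n)
lemma sumLeft_eq (n : Int) :
    2 * ((PySem.List.pyRange 1 n 1).foldl (fun acc i => acc + i) 0) = if 1 ≤ n then n * (n - 1) else 0 := by
  by_cases h : 1 ≤ n
  · rw [if_pos h]
    obtain ⟨m, rfl⟩ : ∃ m : Nat, n = 1 + m := ⟨(n - 1).toNat, by omega⟩
    induction m with
    | zero => simp [PySem.List.pyRange_one_eq_nil]
    | succ k ih =>
      have h2 : (1 : Int) ≤ 1 + k := by omega
      have hstep : (1 : Int) + (k + 1 : Nat) = (1 + (k : Int)) + 1 := by push_cast; ring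
      rw [hstep, PySem.List.pyRange_one_succ_right (by omega), List.foldl_append]
      simp only [List.foldl]
      have := ih h2
      push_cast at this ⊢
      nlinarith [this]
  · rw [if_neg h, PySem.List.pyRange_one_eq_nil (by omega)]
    simp

-- a*(a+1) is even, so Python's // 2 is exact
lemma double_half_sq (a : Int) : 2 * PySem.Int.floordiv (a * (a + 1)) 2 = a * (a + 1) := by
  rw [PySem.Int.floordiv_eq_ediv_of_pos (by omega)]
  have : (2 : Int) ∣ a * (a + 1) := (Int.even_mul_succ_self a).two_dvd
  omega

-- A's loop reaches the solution r0 of 2L = 2·r0·n + r0·(r0+1)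
lemma aLoop_some (n L r0 : Int) (hsol : 2 * L = 2 * r0 * n + r0 * (r0 + 1))
    (hpos : 0 < 2 * n + r0 + 2) :
    ∀ k : Nat, ∀ r s, (r0 - r).toNat = k → 1 ≤ r → r ≤ r0 →
      2 * s = 2 * (r - 1) * n + (r - 1) * r → pvALoop n L r s = some r0 := by
  intro k
  induction k with
  | zero =>
    intro r s hk h1 hr hs
    have hrr : r = r0 := by omega
    subst hrr
    rw [pvALoop]
    have : s + (n + r) = L := by nlinarith
    simp [this]
  | succ k ih =>
    intro r s hk h1 hr hs
    have hlt : r < r0 := by omega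
    rw [pvALoop]
    have hs' : 2 * (s + (n + r)) = 2 * r * n + r * (r + 1) := by nlinarith
    have hfac : 2 * L - 2 * (s + (n + r)) = (r0 - r) * (2 * n + r0 + r + 1) := by nlinarith
    have hgt : 0 < (r0 - r) * (2 * n + r0 + r + 1) := mul_pos (by omega) (by omega)
    have hne : ¬ (s + (n + r) = L) := by omega
    simp only [hne, if_false, gt_iff_lt]
    rw [if_neg (by omega)]
    exact ih (r + 1) (s + (n + r)) (by omega) (by omega) (by omega) (by nlinarith)

-- A's loop finds no solution: none (n ≥ 0, so sum_right strictly climbs)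
lemma aLoop_none (n L : Int) (hn : 0 ≤ n)
    (hnosol : ∀ k : Int, 1 ≤ k → 2 * L ≠ 2 * k * n + k * (k + 1)) :
    ∀ m : Nat, ∀ r s, (L - s).toNat = m → 1 ≤ r →
      2 * s = 2 * (r - 1) * n + (r - 1) * r → pvALoop n L r s = none := by
  intro m
  induction m using Nat.strong_induction_on with
  | _ m ih =>
    intro r s hm h1 hs
    rw [pvALoop]
    have hs' : 2 * (s + (n + r)) = 2 * r * n + r * (r + 1) := by nlinarith
    have hne : ¬ (s + (n + r) = L) := fun h => hnosol r h1 (by omega)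
    simp only [hne, if_false, gt_iff_lt]
    by_cases hgt : L < s + (n + r)
    · rw [if_pos hgt]
    · rw [if_neg hgt]
      have hstep : s < s + (n + r) := by nlinarith
      exact ih ((L - (s + (n + r))).toNat) (by omega) (r + 1) _ rfl (by omega) (by nlinarith)

-- at most one positive solution (n ≥ 0)
lemma sol_uniq (n a b : Int) (hn : 0 ≤ n) (ha : 1 ≤ a) (hb : 1 ≤ b)
    (h : 2 * a * n + a * (a + 1) = 2 * b * n + b * (b + 1)) : a = b := by
  have hf : (a - b) * (2 * n + a + b + 1) = 0 := by nlinarith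
  rcases mul_eq_zero.mp hf with h' | h' <;> omega

-- B's binary search finds the solution it brackets
lemma bLoop_some (n target r0 : Int) (hn : 0 ≤ n) (h1 : 1 ≤ r0)
    (hsol : 2 * target = 2 * r0 * n + r0 * (r0 + 1)) :
    ∀ m : Nat, ∀ lo hi, (hi - lo + 1).toNat = m → 1 ≤ lo → lo ≤ r0 → r0 ≤ hi →
      pvBLoop n target lo hi = some r0 := by
  intro m
  induction m using Nat.strong_induction_on with
  | _ m ih =>
    intro lo hi hm hlo1 hlo hhi
    have hle : lo ≤ hi := by omega
    rw [pvBLoop, if_pos hle]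
    have hmid := PySem.Int.floordiv_two_mid_bounds hle
    set mid := PySem.Int.floordiv (lo + hi) 2 with hmiddef
    have hdub : 2 * (mid * n + PySem.Int.floordiv (mid * (mid + 1)) 2) = 2 * mid * n + mid * (mid + 1) := by
      have := double_half_sq mid; ring_nf; ring_nf at this; omega
    have hfac : 2 * (mid * n + PySem.Int.floordiv (mid * (mid + 1)) 2) - 2 * target
        = (mid - r0) * (2 * n + mid + r0 + 1) := by linear_combination hdub - hsol
    by_cases heq : mid * n + PySem.Int.floordiv (mid * (mid + 1)) 2 = target
    · rw [if_pos heq]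
      have : mid = r0 := sol_uniq n mid r0 hn (by omega) h1 (by omega)
      rw [this]
    · rw [if_neg heq]
      by_cases hlt : mid * n + PySem.Int.floordiv (mid * (mid + 1)) 2 < target
      · rw [if_pos hlt]
        have hmlt : mid < r0 := by
          by_contra hge
          push Not at hge
          have : (mid - r0) * (2 * n + mid + r0 + 1) ≥ 0 := mul_nonneg (by omega) (by omega)
          linarith
        exact ih ((hi - (mid + 1) + 1).toNat) (by omega) (mid + 1) hi rfl (by omega) (by omega) hhi
      · rw [if_neg hlt]
        have hmgt : r0 < mid := by
          by_contra hge
          push Not at hge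
          have : (mid - r0) * (2 * n + mid + r0 + 1) ≤ 0 :=
            mul_nonpos_iff.mpr (Or.inr ⟨by omega, by omega⟩)
          omega
        exact ih ((mid - 1 - lo + 1).toNat) (by omega) lo (mid - 1) rfl hlo1 hlo (by omega)

-- B's binary search with no solution anywhere: none
lemma bLoop_none (n target : Int)
    (hnosol : ∀ k : Int, 1 ≤ k → 2 * target ≠ 2 * k * n + k * (k + 1)) :
    ∀ m : Nat, ∀ lo hi, (hi - lo + 1).toNat = m → 1 ≤ lo →
      pvBLoop n target lo hi = none := by
  intro m
  induction m using Nat.strong_induction_on with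
  | _ m ih =>
    intro lo hi hm hlo1
    rw [pvBLoop]
    by_cases hle : lo ≤ hi
    · rw [if_pos hle]
      have hmid := PySem.Int.floordiv_two_mid_bounds hle
      set mid := PySem.Int.floordiv (lo + hi) 2 with hmiddef
      have hdub : 2 * (mid * n + PySem.Int.floordiv (mid * (mid + 1)) 2) = 2 * mid * n + mid * (mid + 1) := by
        have := double_half_sq mid; ring_nf; ring_nf at this; omega
      have hne : ¬ (mid * n + PySem.Int.floordiv (mid * (mid + 1)) 2 = target) := by
        intro h
        exact hnosol mid (by omega) (by nlinarith)
      rw [if_neg hne]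
      by_cases hlt : mid * n + PySem.Int.floordiv (mid * (mid + 1)) 2 < target
      · rw [if_pos hlt]
        exact ih ((hi - (mid + 1) + 1).toNat) (by omega) (mid + 1) hi rfl (by omega)
      · rw [if_neg hlt]
        exact ih ((mid - 1 - lo + 1).toNat) (by omega) lo (mid - 1) rfl hlo1
    · rw [if_neg hle]

-- ===== VERDICT (by name: the statement is the Claim_ definition above) =====
theorem is_balancing_number_spec : Claim_equal_is_balancing_number := by
  intro n _ hn
  unfold Pre_is_balancing_number at hn
  unfold Spec_is_balancing_number is_balancing_number is_balancing_number_alt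
  simp only []
  set L := (PySem.List.pyRange 1 n 1).foldl (fun acc i => acc + i) 0 with hLdef
  have hL := sumLeft_eq n
  rw [← hLdef] at hL
  have hLn : 2 * L = n * (n - 1) := by
    by_cases h1 : 1 ≤ n
    · rwa [if_pos h1] at hL
    · have : n = 0 := by omega
      subst this
      rw [if_neg h1] at hL; omega
  have htarget : 2 * PySem.Int.floordiv (n * (n - 1)) 2 = n * (n - 1) := by
    have := double_half_sq (n - 1)
    have hcomm : n * (n - 1) = (n - 1) * ((n - 1) + 1) := by ring
    rw [hcomm]; omega
  have htL : PySem.Int.floordiv (n * (n - 1)) 2 = L := by omega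
  rw [htL]
  by_cases hex : ∃ r0 : Int, 1 ≤ r0 ∧ 2 * L = 2 * r0 * n + r0 * (r0 + 1)
  · obtain ⟨r0, h1, hsol⟩ := hex
    have hA := aLoop_some n L r0 hsol (by omega)
      (r0 - 1).toNat 1 0 rfl (by omega) (by omega) (by ring)
    -- any solution lies below n (so the initial bracket [1, n] contains it)
    have hr0n : r0 ≤ n := by
      by_contra hgt
      push Not at hgt
      have hmul1 : (n + 1) * n ≤ r0 * n := mul_le_mul_of_nonneg_right (by omega) hn
      have hmul2 : (n + 1) * (n + 2) ≤ r0 * (r0 + 1) :=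
        mul_le_mul (by omega) (by omega) (by omega) (by omega)
      nlinarith [hsol, hmul1, hmul2, sq_nonneg n]
    have hB := bLoop_some n L r0 hn h1 hsol (n - 1 + 1).toNat 1 n rfl
      (by omega) h1 hr0n
    rw [hA, hB]
  · have hnosol : ∀ k : Int, 1 ≤ k → 2 * L ≠ 2 * k * n + k * (k + 1) := by
      intro k hk hcontra
      exact hex ⟨k, hk, hcontra⟩
    have hA := aLoop_none n L hn hnosol (L - 0).toNat 1 0 rfl (by omega) (by ring)
    have hB := bLoop_none n L hnosol (n - 1 + 1).toNat 1 n rfl (by omega)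
    rw [hA, hB]
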